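-- pv_equiv track=rewrite | github.com/hbhargava7/celltx | model.py | gen_circuitry_states
-- ===== SOURCE A (Python) =====
-- def gen_circuitry_states(state_names):
-- 	# vars is an array of string names
-- 	# desired output is:
-- 	# [[(activated, 0), (primed, 0)], [(activated, 1), (primed, 1)], ...]
-- 	# for each state, iterate through the other states
--
-- 	n = len(state_names)
-- 	out = []
--
-- 	# Iterate through all possible states of n binary vars
-- 	for i in range(1 << n):
-- 		s = bin(i)[2:]
-- 		s = '0' * (n - len(s)) + s
-- 		state = list(map(int,list(s)))
-- 		stateDescription = [(state_names[j], state[j]) for j in range(n)]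
-- 		out.append(stateDescription)
-- 	return out
-- ===== SOURCE B (Python) =====
-- def gen_circuitry_states(state_names):
--     # Recursion over the name list: the first name is the most significant bit,
--     # so the b = 0 branch comes before the b = 1 branch.
--     if not state_names:
--         return [[]]
--     rest = gen_circuitry_states(state_names[1:])
--     return [[(state_names[0], b)] + r for b in (0, 1) for r in rest]
-- ===== Notes on version B (the rewrite author's own statement) =====
-- stated objective: alternative
-- what changed: Replaces integer enumeration with bin()-string padding and per-index lookups by a structural recursion on the name list that builds each combination by prepending (name, bit) to the combinations of the tail.
import Mathlib
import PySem

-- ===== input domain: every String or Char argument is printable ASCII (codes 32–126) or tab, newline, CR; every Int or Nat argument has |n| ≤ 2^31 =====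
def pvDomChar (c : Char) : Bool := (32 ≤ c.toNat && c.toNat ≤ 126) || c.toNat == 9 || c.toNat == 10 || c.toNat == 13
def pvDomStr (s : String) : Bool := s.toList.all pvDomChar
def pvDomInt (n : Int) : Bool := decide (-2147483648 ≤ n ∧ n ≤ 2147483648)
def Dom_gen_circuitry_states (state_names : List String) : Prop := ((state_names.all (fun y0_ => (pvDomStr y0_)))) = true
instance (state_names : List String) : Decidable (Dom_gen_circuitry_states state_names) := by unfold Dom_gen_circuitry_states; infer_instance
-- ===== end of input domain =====

-- B replaces A's integer enumeration + binary-string padding by a structural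
-- recursion on the name list (alternative decomposition; same asymptotic cost).

-- ===== PORT A =====
-- bin(i)[2:] for i ≥ 0 without the leading-zero special case: digits of a positive number
def pvBinGo : Nat → List Char
  | 0 => []
  | (m+1) => pvBinGo ((m+1)/2) ++ [if (m+1) % 2 = 1 then '1' else '0']
decreasing_by exact Nat.div_lt_self (Nat.succ_pos m) (by omega)

-- bin(i)[2:]; A only applies it to i ≥ 0 (i ranges over range(1 << n)), where it is exact
def pvBin (i : Int) : List Char := if i.toNat = 0 then ['0'] else pvBinGo i.toNat

def gen_circuitry_states (state_names : List String) : List (List (String × Int)) :=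
  let n := state_names.length
  -- for i in range(1 << n): out.append(stateDescription)
  (PySem.List.pyRange 0 ((2:Int)^n) 1).foldl (fun out i =>
    let s := pvBin i
    -- s = '0' * (n - len(s)) + s   (Python's negative repeat count gives '', like Nat.sub)
    let s := List.replicate (n - s.length) '0' ++ s
    -- int(c) on the digit chars '0'/'1': exact as code − 48
    let state : List Int := s.map (fun c => ((c.toNat : Int) - 48))
    -- [(state_names[j], state[j]) for j in range(n)]; both indexings are in range
    let stateDescription := (PySem.List.pyRange 0 (n : Int) 1).map (fun j =>
      (PySem.List.pyGetD state_names j "", PySem.List.pyGetD state j 0))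
    out ++ [stateDescription]) []

-- ===== PORT B =====
def gen_circuitry_states_alt (state_names : List String) : List (List (String × Int)) :=
  match state_names with
  | [] => [[]]
  | x :: xs =>
    let rest := gen_circuitry_states_alt xs
    -- [[(state_names[0], b)] + r for b in (0, 1) for r in rest]
    ([(0 : Int), 1]).flatMap (fun b => rest.map (fun r => [(x, b)] ++ r))

-- ===== PRECONDITION & SPEC =====
def Spec_gen_circuitry_states (state_names : List String) (out : List (List (String × Int))) : Prop := out = gen_circuitry_states_alt state_names
instance (state_names : List String) (out : List (List (String × Int))) : Decidable (Spec_gen_circuitry_states state_names out) := by unfold Spec_gen_circuitry_states; infer_instance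

-- ===== CLAIM (what is proved, stated in full; the proofs are below) =====
def Claim_equal_gen_circuitry_states : Prop := ∀ (state_names : List String), Dom_gen_circuitry_states state_names → Spec_gen_circuitry_states state_names (gen_circuitry_states state_names)

-- ===== LEMMAS AND PROOFS =====

-- exact n-digit binary string of k, MSB first
def pvDigs : Nat → Nat → List Char
  | 0, _ => []
  | (n+1), k => pvDigs n (k/2) ++ [if k % 2 = 1 then '1' else '0']

-- exact n-bit list of k as Ints, MSB first
def pvBits : Nat → Nat → List Int
  | 0, _ => []
  | (n+1), k => pvBits n (k/2) ++ [(k % 2 : Int)]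

theorem pvDigs_zero (n : Nat) : pvDigs n 0 = List.replicate n '0' := by
  induction n with
  | zero => rfl
  | succ n ih => simp [pvDigs, ih, List.replicate_succ' (n := n)]

theorem pvBits_length (n k : Nat) : (pvBits n k).length = n := by
  induction n generalizing k with
  | zero => rfl
  | succ n ih => simp [pvBits, ih]

theorem pvBinGo_pad (n : Nat) : ∀ k, k ≠ 0 → k < 2^n →
    List.replicate (n - (pvBinGo k).length) '0' ++ pvBinGo k = pvDigs n k := by
  induction n with
  | zero => intro k hk0 hk; omega
  | succ n ih =>
    intro k hk0 hk
    obtain ⟨m, rfl⟩ := Nat.exists_eq_succ_of_ne_zero hk0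
    rw [pvBinGo]
    by_cases hq : (m+1)/2 = 0
    · have hm : m = 0 := by omega
      subst hm
      simp [pvBinGo, pvDigs, pvDigs_zero]
    · have hq2 : (m+1)/2 < 2^n := by
        have : (2:Nat)^(n+1) = 2 * 2^n := by ring
        omega
      have hlen : (pvBinGo ((m+1)/2) ++ [if (m+1) % 2 = 1 then '1' else '0']).length
          = (pvBinGo ((m+1)/2)).length + 1 := by simp
      rw [hlen, show (n+1) - ((pvBinGo ((m+1)/2)).length + 1) = n - (pvBinGo ((m+1)/2)).length by omega,
          ← List.append_assoc, ih ((m+1)/2) hq hq2]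
      rfl

theorem pvBin_pad (n k : Nat) (hk : k < 2^n) (hn : 1 ≤ n) :
    List.replicate (n - (pvBin (k : Int)).length) '0' ++ pvBin (k : Int) = pvDigs n k := by
  by_cases hk0 : k = 0
  · subst hk0
    obtain ⟨m, rfl⟩ := Nat.exists_eq_add_of_le hn
    simp [pvBin, pvDigs_zero]
    rw [show (1 + m) = m + 1 by omega, List.replicate_succ']
  · have : (k : Int).toNat = k := Int.toNat_natCast k
    simp only [pvBin, this, hk0, if_false]
    exact pvBinGo_pad n k hk0 hk

theorem pvDigs_map (n k : Nat) :
    (pvDigs n k).map (fun c => ((c.toNat : Int) - 48)) = pvBits n k := by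
  induction n generalizing k with
  | zero => rfl
  | succ n ih =>
    simp only [pvDigs, pvBits, List.map_append, ih, List.map_cons, List.map_nil]
    congr 1
    split <;> rename_i h <;> simp only [List.cons.injEq, and_true]
    · have h1 : ('1'.toNat : Int) = 49 := by decide
      rw [h1]; omega
    · have h0 : ('0'.toNat : Int) = 48 := by decide
      rw [h0]; omega

theorem pvBits_split (n k : Nat) (hk : k < 2^(n+1)) :
    pvBits (n+1) k = (if 2^n ≤ k then (1 : Int) else 0) :: pvBits n (k % 2^n) := by
  induction n generalizing k with
  | zero =>
    norm_num at hk
    interval_cases k <;> simp [pvBits]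
  | succ n ih =>
    have h2 : (2:Nat)^(n+2) = 2 * 2^(n+1) := by ring
    have h1 : (2:Nat)^(n+1) = 2 * 2^n := by ring
    have hk2 : k / 2 < 2^(n+1) := by omega
    have e1 : (k / 2) % 2^n = (k % 2^(n+1)) / 2 := by
      rw [h1, Nat.mod_mul_right_div_self]
    have e3 : (2^(n+1) ≤ k) ↔ (2^n ≤ k / 2) := by
      rw [Nat.le_div_iff_mul_le (by omega : 0 < 2)]; omega
    show pvBits (n+1) (k/2) ++ [(k % 2 : Int)] = _
    rw [ih _ hk2, e1]
    by_cases hb : 2^(n+1) ≤ k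
    · simp [hb, e3.mp hb, pvBits]
    · have hb' : ¬ 2^n ≤ k / 2 := fun hc => hb (e3.mpr hc)
      simp [hb, hb', pvBits]

theorem pvRange_cast (n : Nat) :
    PySem.List.pyRange 0 (n : Int) 1 = (List.range n).map (fun j : Nat => (j : Int)) := by
  rw [PySem.List.pyRange_one]
  simp only [sub_zero, Int.toNat_natCast, zero_add]

-- A's stateDescription for names at index k equals names.zip (pvBits n k)
theorem pvZip_lemma (names : List String) (bs : List Int) (h : names.length = bs.length) :
    (List.range names.length).map (fun j => (names.getD j "", bs.getD j 0)) = names.zip bs := by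
  induction names generalizing bs with
  | nil => rfl
  | cons x xs ih =>
    cases bs with
    | nil => simp at h
    | cons b bs =>
      have h' : xs.length = bs.length := by simpa using h
      simp only [List.length_cons, List.range_succ_eq_map, List.map_cons, List.map_map]
      rw [List.zip_cons_cons]
      congr 1
      rw [← ih bs h']
      apply List.map_congr_left
      intro j hj
      simp

theorem pvDesc_eq (names : List String) (k : Nat) (hk : k < 2^names.length) :
    ((PySem.List.pyRange 0 (names.length : Int) 1).map (fun j =>
      (PySem.List.pyGetD names j "",
       PySem.List.pyGetD ((List.replicate (names.length - (pvBin (k : Int)).length) '0' ++ pvBin (k : Int)).map (fun c => ((c.toNat : Int) - 48))) j 0)))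
    = names.zip (pvBits names.length k) := by
  have hstate : 1 ≤ names.length →
      (List.replicate (names.length - (pvBin (k : Int)).length) '0' ++ pvBin (k : Int)).map
        (fun c => ((c.toNat : Int) - 48)) = pvBits names.length k := by
    intro hn
    rw [pvBin_pad _ _ hk hn, pvDigs_map]
  cases names with
  | nil => simp
  | cons x xs =>
    rw [hstate (by simp)]
    rw [pvRange_cast, List.map_map, ← pvZip_lemma (x::xs) (pvBits (x::xs).length k) (by rw [pvBits_length])]
    apply List.map_congr_left
    intro j hj
    simp [Function.comp]

theorem pvMain (names : List String) :
    (List.range (2^names.length)).map (fun k => names.zip (pvBits names.length k))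
    = gen_circuitry_states_alt names := by
  induction names with
  | nil => simp [gen_circuitry_states_alt, pvBits]
  | cons x xs ih =>
    have h2 : (2:Nat)^(x::xs).length = 2^xs.length + 2^xs.length := by
      simp [List.length_cons]; ring
    rw [h2, List.range_add, List.map_append, List.map_map]
    show _ = ([(0:Int),1]).flatMap (fun b => (gen_circuitry_states_alt xs).map (fun r => [(x, b)] ++ r))
    rw [← ih]
    simp only [List.flatMap_cons, List.flatMap_nil, List.map_map, List.append_nil]
    congr 1
    · apply List.map_congr_left
      intro k hk
      have hk' : k < 2^xs.length := List.mem_range.mp hk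
      have hpow : (2:Nat)^(xs.length+1) = 2^xs.length + 2^xs.length := by ring
      simp only [Function.comp, List.length_cons]
      rw [pvBits_split xs.length k (by omega)]
      have hnle : ¬ 2^xs.length ≤ k := by omega
      simp [Nat.mod_eq_of_lt hk', hnle]
    · apply List.map_congr_left
      intro k hk
      have hk' : k < 2^xs.length := List.mem_range.mp hk
      have hpow : (2:Nat)^(xs.length+1) = 2^xs.length + 2^xs.length := by ring
      simp only [Function.comp, List.length_cons]
      rw [pvBits_split xs.length (2^xs.length + k) (by omega)]
      have hle : 2^xs.length ≤ 2^xs.length + k := by omega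
      simp [Nat.add_mod_left, Nat.mod_eq_of_lt hk', hle]

-- ===== VERDICT (by name: the statement is the Claim_ definition above) =====
theorem gen_circuitry_states_spec : Claim_equal_gen_circuitry_states := by
  intro names _
  show gen_circuitry_states names = gen_circuitry_states_alt names
  simp only [gen_circuitry_states]
  rw [PySem.List.foldl_append_singleton_eq_map, List.nil_append]
  have h2 : ((2:Int)^names.length) = ((2^names.length : Nat) : Int) := by push_cast; ring
  rw [h2, pvRange_cast (2^names.length), List.map_map, ← pvMain names]
  apply List.map_congr_left
  intro k hk
  have hk' : k < 2^names.length := List.mem_range.mp hk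
  simpa [Function.comp] using pvDesc_eq names k hk'
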